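-- pv_equiv track=rewrite | github.com/sagrawal0410/dreamzero | scripts/stage1/causal_maps_compute.py | _select_examples
-- ===== SOURCE A (Python) =====
-- from typing import Any, Iterable
--
-- def _select_examples(manifest: list[dict[str, Any]], num: int,
--                      phase_balanced: bool) -> list[dict[str, Any]]:
--     if not phase_balanced:
--         return manifest[:num]
--     # Stratify by (task_group, role) so phase-analysis later has enough data.
--     by_key: dict[tuple[str, str], list[dict[str, Any]]] = {}
--     for entry in manifest:
--         by_key.setdefault((entry.get("task_group", ""), entry.get("role", "")), []).append(entry)
--     keys = sorted(by_key.keys())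
--     chosen: list[dict[str, Any]] = []
--     while len(chosen) < num and keys:
--         for k in list(keys):
--             if not by_key[k]:
--                 keys.remove(k); continue
--             chosen.append(by_key[k].pop(0))
--             if len(chosen) >= num:
--                 break
--     return chosen[:num]
-- ===== SOURCE B (Python) =====
-- def _select_examples(manifest, num, phase_balanced):
--     if not phase_balanced:
--         return manifest[:num]
--     # Group once, then emit the round-robin order column by column: row i holds
--     # the i-th element of every (sorted) key's bucket; truncate to num at the end.
--     groups = {}
--     for entry in manifest:
--         groups.setdefault((entry.get("task_group", ""), entry.get("role", "")), []).append(entry)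
--     keys = sorted(groups)
--     longest = max(map(len, groups.values()), default=0)
--     chosen = []
--     for i in range(longest):
--         for k in keys:
--             g = groups[k]
--             if i < len(g):
--                 chosen.append(g[i])
--     return chosen[:max(num, 0)]
-- ===== Notes on version B (the rewrite author's own statement) =====
-- stated objective: alternative
-- what changed: Replaces the destructive while-loop round robin (list(keys) copies, keys.remove, pop(0)) by a non-destructive column-wise emission: group once, then for each row index i append the i-th element of every sorted key's bucket, truncating to num at the end.
import Mathlib
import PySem

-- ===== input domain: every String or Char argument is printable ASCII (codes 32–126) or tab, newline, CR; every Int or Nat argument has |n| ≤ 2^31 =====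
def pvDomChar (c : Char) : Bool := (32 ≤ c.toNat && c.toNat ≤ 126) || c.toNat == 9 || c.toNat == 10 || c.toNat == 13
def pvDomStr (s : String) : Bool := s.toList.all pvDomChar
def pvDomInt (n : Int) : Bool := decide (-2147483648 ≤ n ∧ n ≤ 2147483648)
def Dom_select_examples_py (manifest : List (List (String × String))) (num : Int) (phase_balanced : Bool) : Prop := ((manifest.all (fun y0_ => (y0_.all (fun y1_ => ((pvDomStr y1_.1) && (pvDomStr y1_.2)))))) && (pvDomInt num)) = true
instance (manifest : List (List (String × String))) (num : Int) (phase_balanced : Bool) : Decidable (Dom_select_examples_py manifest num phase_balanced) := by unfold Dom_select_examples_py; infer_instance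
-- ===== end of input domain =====

-- B replaces A's destructive while/pop(0)/keys.remove round robin by one non-destructive
-- column-wise emission over the grouped buckets (same return value).

-- ===== PORT A =====
-- entry.get("task_group", "") / entry.get("role", "") on the entry dict
def pvKeyA (e : List (String × String)) : String × String :=
  ((PySem.Dict.mk e).getD "task_group" "", (PySem.Dict.mk e).getD "role" "")

-- fuel bound for the while loop (the loop itself has no counter; this only makes it total)
def pvTL (keys : List (String × String))
    (d : PySem.Dict (String × String) (List (List (String × String)))) : Nat :=
  (keys.map (fun k => (d.getD k []).length)).sum

-- the body of the 'for k in list(keys)' loop: snap is the list(keys) snapshot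
def pvPassA (num : Int) :
    List (String × String) → List (String × String) →
    PySem.Dict (String × String) (List (List (String × String))) →
    List (List (String × String)) →
    List (String × String) × PySem.Dict (String × String) (List (List (String × String))) × List (List (String × String))
  | [], keys, d, chosen => (keys, d, chosen)
  | k :: rest, keys, d, chosen =>
    match d.getD k [] with   -- by_key[k]; k is always a key of by_key, so getD is exact
    | [] => pvPassA num rest ((PySem.List.remove? keys k).getD keys) d chosen
            -- keys.remove(k); k is always present, so ValueError is impossible
    | e :: g =>
      let chosen' := chosen ++ [e]           -- chosen.append(by_key[k].pop(0))
      let d' := d.insert k g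
      if num ≤ (chosen'.length : Int) then (keys, d', chosen')   -- break
      else pvPassA num rest keys d' chosen'

-- while len(chosen) < num and keys:
def pvWhileA (num : Int) :
    Nat → List (String × String) →
    PySem.Dict (String × String) (List (List (String × String))) →
    List (List (String × String)) → List (List (String × String))
  | 0, _, _, chosen => chosen
  | fuel + 1, keys, d, chosen =>
    if (chosen.length : Int) < num ∧ keys ≠ [] then
      let r := pvPassA num keys keys d chosen
      pvWhileA num fuel r.1 r.2.1 r.2.2
    else chosen

def select_examples_py (manifest : List (List (String × String))) (num : Int) (phase_balanced : Bool) : List (List (String × String)) :=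
  if phase_balanced = false then PySem.List.slice manifest none (some num)
  else
    let d := manifest.foldl (fun d e => d.modify (pvKeyA e) [] (fun v => v ++ [e])) PySem.Dict.empty
    let keys := PySem.List.sorted2 d.keys Prod.fst Prod.snd
    PySem.List.slice (pvWhileA num (keys.length + pvTL keys d + 1) keys d []) none (some num)

-- ===== PORT B =====
def select_examples_py_alt (manifest : List (List (String × String))) (num : Int) (phase_balanced : Bool) : List (List (String × String)) :=
  if phase_balanced = false then PySem.List.slice manifest none (some num)
  else
    let d := manifest.foldl (fun d e => d.modify (pvKeyA e) [] (fun v => v ++ [e])) PySem.Dict.empty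
    let keys := PySem.List.sorted2 d.keys Prod.fst Prod.snd
    let longest := PySem.List.maxD (d.values.map (fun g => PySem.List.len g)) (fun x => x) 0
    let chosen := (PySem.List.pyRange 0 longest 1).foldl (fun acc i =>
        keys.foldl (fun acc k =>
          if i < PySem.List.len (d.getD k []) then acc ++ [PySem.List.pyGetD (d.getD k []) i []]
          else acc) acc) []
    PySem.List.slice chosen none (some (max num 0))

-- ===== PRECONDITION & SPEC =====
def Spec_select_examples_py (manifest : List (List (String × String))) (num : Int) (phase_balanced : Bool) (out : List (List (String × String))) : Prop := out = select_examples_py_alt manifest num phase_balanced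
instance (manifest : List (List (String × String))) (num : Int) (phase_balanced : Bool) (out : List (List (String × String))) : Decidable (Spec_select_examples_py manifest num phase_balanced out) := by unfold Spec_select_examples_py; infer_instance

-- ===== CLAIM (what is proved, stated in full; the proofs are below) =====
def Claim_equal_select_examples_py : Prop := ∀ (manifest : List (List (String × String))) (num : Int) (phase_balanced : Bool), Dom_select_examples_py manifest num phase_balanced → Spec_select_examples_py manifest num phase_balanced (select_examples_py manifest num phase_balanced)

-- ===== LEMMAS AND PROOFS =====

-- column i of the round robin: the i-th element of every key's bucket
def pvCol (keys : List (String × String)) (bf : String × String → List (List (String × String))) (i : Nat) :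
    List (List (String × String)) :=
  keys.filterMap (fun k => (bf k)[i]?)

def pvRows (n : Nat) (keys : List (String × String)) (bf : String × String → List (List (String × String))) :
    List (List (String × String)) :=
  (List.range n).flatMap (pvCol keys bf)

lemma pvCol_congr (keys : List (String × String)) (bf bf' : String × String → List (List (String × String))) (i : Nat)
    (h : ∀ k ∈ keys, bf k = bf' k) : pvCol keys bf i = pvCol keys bf' i := by
  induction keys with
  | nil => rfl
  | cons k ks ih =>
    simp only [pvCol, List.filterMap_cons] at *
    rw [h k (by simp), ih (fun k hk => h k (by simp [hk]))]

lemma pvRows_congr (n : Nat) (keys : List (String × String)) (bf bf' : String × String → List (List (String × String)))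
    (h : ∀ k ∈ keys, bf k = bf' k) : pvRows n keys bf = pvRows n keys bf' := by
  unfold pvRows
  exact List.flatMap_congr (fun i _ => pvCol_congr keys bf bf' i h)

lemma pvCol_filter (keys : List (String × String)) (bf : String × String → List (List (String × String)))
    (p : String × String → Bool) (i : Nat) (h : ∀ k ∈ keys, p k = false → bf k = []) :
    pvCol (keys.filter p) bf i = pvCol keys bf i := by
  induction keys with
  | nil => rfl
  | cons k ks ih =>
    by_cases hp : p k
    · simp only [pvCol, List.filter_cons, hp, if_true, List.filterMap_cons] at *
      rw [ih (fun k hk hpk => h k (by simp [hk]) hpk)]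
    · have hb : bf k = [] := h k (by simp) (by simpa using hp)
      simp only [pvCol, List.filter_cons, hp, List.filterMap_cons, hb,
        List.getElem?_nil] at *
      exact ih (fun k hk hpk => h k (by simp [hk]) hpk)

lemma pvRows_filter (n : Nat) (keys : List (String × String)) (bf : String × String → List (List (String × String)))
    (p : String × String → Bool) (h : ∀ k ∈ keys, p k = false → bf k = []) :
    pvRows n (keys.filter p) bf = pvRows n keys bf := by
  unfold pvRows
  exact List.flatMap_congr (fun i _ => pvCol_filter keys bf p i h)

lemma pvCol_zero (keys : List (String × String)) (bf : String × String → List (List (String × String))) :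
    pvCol keys bf 0 = (keys.filter (fun k => !(bf k).isEmpty)).map (fun k => (bf k).headI) := by
  induction keys with
  | nil => rfl
  | cons k ks ih =>
    cases hb : bf k with
    | nil => simp [pvCol, hb] at *; exact ih
    | cons e g => simp [pvCol, hb] at *; exact ih

lemma pvRows_succ (n : Nat) (keys : List (String × String)) (bf : String × String → List (List (String × String))) :
    pvRows (n + 1) keys bf = pvCol keys bf 0 ++ pvRows n keys (fun k => (bf k).tail) := by
  unfold pvRows
  rw [List.range_succ_eq_map, List.flatMap_cons, List.flatMap_map]
  congr 1
  refine List.flatMap_congr (fun i _ => ?_)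
  unfold pvCol
  refine List.filterMap_congr (fun k _ => ?_)
  simp [List.getElem?_tail]

lemma pvRows_nil (n : Nat) (bf : String × String → List (List (String × String))) :
    pvRows n [] bf = [] := by
  simp [pvRows, pvCol]

-- A's inner for-loop: final chosen, and (when no break fired) final keys and dict
lemma pvPassA_spec (num : Int) :
    ∀ (snap p : List (String × String))
      (d : PySem.Dict (String × String) (List (List (String × String))))
      (chosen : List (List (String × String))),
    (p ++ snap).Nodup → (chosen.length : Int) < num →
    (pvPassA num snap (p ++ snap) d chosen).2.2 =
      chosen ++ ((snap.filter (fun k => !(d.getD k []).isEmpty)).map (fun k => (d.getD k []).headI)).take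
        (num.toNat - chosen.length) ∧
    ((chosen.length + (snap.filter (fun k => !(d.getD k []).isEmpty)).length : Int) < num →
      (pvPassA num snap (p ++ snap) d chosen).1 = p ++ snap.filter (fun k => !(d.getD k []).isEmpty) ∧
      ∀ k, (pvPassA num snap (p ++ snap) d chosen).2.1.getD k [] =
        if k ∈ snap then (d.getD k []).tail else d.getD k []) := by
  intro snap
  induction snap with
  | nil =>
    intro p d chosen _ _
    refine ⟨by simp [pvPassA], fun _ => ⟨by simp [pvPassA], fun k => by simp [pvPassA]⟩⟩
  | cons k rest ih =>
    intro p d chosen hnd hlt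
    have hknd := List.nodup_cons.mp (List.nodup_middle.mp hnd)
    have hkp : k ∉ p := fun hk => hknd.1 (List.mem_append_left _ hk)
    have hkr : k ∉ rest := fun hk => hknd.1 (List.mem_append_right _ hk)
    cases hb : d.getD k [] with
    | nil =>
      -- keys.remove(k) on p ++ k :: rest gives p ++ rest
      have hrem : (PySem.List.remove? (p ++ k :: rest) k).getD (p ++ k :: rest) = p ++ rest := by
        rw [PySem.List.remove?_eq_some_erase _ k (by simp)]
        rw [List.erase_append_right _ hkp, List.erase_cons_head]
        rfl
      have hnd' : (p ++ rest).Nodup := hknd.2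
      have hih := ih p d chosen hnd' hlt
      have hstep : pvPassA num (k :: rest) (p ++ k :: rest) d chosen
          = pvPassA num rest (p ++ rest) d chosen := by
        simp only [pvPassA, hb, hrem]
      rw [hstep]
      have hf : (k :: rest).filter (fun k => !(d.getD k []).isEmpty)
          = rest.filter (fun k => !(d.getD k []).isEmpty) := by
        simp [hb]
      rw [hf]
      refine ⟨hih.1, fun hlen => ?_⟩
      obtain ⟨h1, h2⟩ := hih.2 hlen
      refine ⟨h1, fun k' => ?_⟩
      by_cases hk' : k' = k
      · subst hk'
        rw [h2 k']
        simp [hkr, hb]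
      · rw [h2 k']
        simp [hk']
    | cons e g =>
      have hf : (k :: rest).filter (fun k => !(d.getD k []).isEmpty)
          = k :: rest.filter (fun k => !(d.getD k []).isEmpty) := by
        simp [hb]
      by_cases hbr : num ≤ ((chosen ++ [e]).length : Int)
      · have hstep : pvPassA num (k :: rest) (p ++ k :: rest) d chosen
            = (p ++ k :: rest, d.insert k g, chosen ++ [e]) := by
          simp only [pvPassA, hb]
          rw [if_pos hbr]
        rw [hstep, hf]
        have ht : num.toNat - chosen.length = 1 := by
          simp at hbr; omega
        constructor
        · simp [ht, hb]
        · intro hlen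
          exfalso
          simp at hlen hbr
          omega
      · have hstep : pvPassA num (k :: rest) (p ++ k :: rest) d chosen
            = pvPassA num rest (p ++ k :: rest) (d.insert k g) (chosen ++ [e]) := by
          simp only [pvPassA, hb]
          rw [if_neg hbr]
        have hassoc : p ++ k :: rest = (p ++ [k]) ++ rest := by simp
        have hnd2 : ((p ++ [k]) ++ rest).Nodup := by rwa [← hassoc]
        have hlt2 : (((chosen ++ [e]).length : Nat) : Int) < num := by
          simp at hbr ⊢; omega
        have hih := ih (p ++ [k]) (d.insert k g) (chosen ++ [e]) hnd2 hlt2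
        rw [hstep, hassoc]
        -- buckets of rest are unchanged by the insert at k
        have hcong : ∀ k' ∈ rest, (d.insert k g).getD k' [] = d.getD k' [] := by
          intro k' hk'
          exact PySem.Dict.getD_insert_of_ne d g [] (fun h => hkr (h ▸ hk'))
        have hfc : rest.filter (fun k' => !((d.insert k g).getD k' []).isEmpty)
            = rest.filter (fun k' => !(d.getD k' []).isEmpty) :=
          List.filter_congr (fun k' hk' => by rw [hcong k' hk'])
        have hmc : (rest.filter (fun k' => !(d.getD k' []).isEmpty)).map
              (fun k' => ((d.insert k g).getD k' []).headI)
            = (rest.filter (fun k' => !(d.getD k' []).isEmpty)).map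
              (fun k' => (d.getD k' []).headI) :=
          List.map_congr_left (fun k' hk' => by rw [hcong k' (List.mem_of_mem_filter hk')])
        rw [hfc, hmc] at hih
        have hbr' : (chosen.length : Int) + 1 < num := by simp at hbr; omega
        have ht : num.toNat - chosen.length = (num.toNat - (chosen ++ [e]).length) + 1 := by
          simp; omega
        constructor
        · rw [hih.1, hf]
          simp only [ht]
          simp [List.take_succ_cons, hb]
        · intro hlen
          rw [hf] at hlen
          have hlen' : (((chosen ++ [e]).length : Nat) : Int)
              + ((rest.filter (fun k' => !(d.getD k' []).isEmpty)).length : Int) < num := by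
            simp at hlen ⊢; omega
          obtain ⟨h1, h2⟩ := hih.2 hlen'
          constructor
          · rw [h1, hf]; simp
          · intro k'
            rw [h2 k']
            by_cases hk' : k' = k
            · subst hk'
              simp [hkr, PySem.Dict.getD_insert_self, hb]
            · rw [PySem.Dict.getD_insert_of_ne d g [] hk']
              simp [hk']

lemma pvWhileA_stop (num : Int) (fuel : Nat) (keys : List (String × String))
    (d : PySem.Dict (String × String) (List (List (String × String))))
    (chosen : List (List (String × String)))
    (h : ¬ ((chosen.length : Int) < num ∧ keys ≠ [])) :
    pvWhileA num fuel keys d chosen = chosen := by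
  cases fuel with
  | zero => rfl
  | succ f => simp [pvWhileA, h]

lemma pvSumPred (l : List (String × String)) (f g : String × String → Nat)
    (h : ∀ k ∈ l, g k + 1 = f k) : (l.map g).sum + l.length = (l.map f).sum := by
  induction l with
  | nil => rfl
  | cons k ks ih =>
    have h1 := h k (by simp)
    have h2 := ih (fun k hk => h k (by simp [hk]))
    simp only [List.map_cons, List.sum_cons, List.length_cons]
    omega

lemma pvTL_filter_le (keys : List (String × String)) (p : String × String → Bool)
    (d : PySem.Dict (String × String) (List (List (String × String)))) :
    pvTL (keys.filter p) d ≤ pvTL keys d := by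
  unfold pvTL
  induction keys with
  | nil => simp
  | cons k ks ih =>
    by_cases hp : p k
    · simp [hp]; omega
    · simp [hp]; omega

-- the while loop produces the column-wise order, truncated to num
lemma pvWhileA_spec (num : Int) :
    ∀ (fuel : Nat) (keys : List (String × String))
      (d : PySem.Dict (String × String) (List (List (String × String))))
      (chosen : List (List (String × String))) (N : Nat),
    keys.Nodup → keys.length + pvTL keys d < fuel →
    (∀ k ∈ keys, (d.getD k []).length ≤ N) →
    pvWhileA num fuel keys d chosen =
      chosen ++ (pvRows N keys (fun k => d.getD k [])).take (num.toNat - chosen.length) := by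
  intro fuel
  induction fuel with
  | zero => intro keys d chosen N _ hm _; omega
  | succ fuel ih =>
    intro keys d chosen N hndk hm hbound
    by_cases hc : (chosen.length : Int) < num ∧ keys ≠ []
    · obtain ⟨hlt, hkne⟩ := hc
      simp only [pvWhileA, if_pos (And.intro hlt hkne)]
      have hps := pvPassA_spec num keys [] d chosen (by simpa using hndk) hlt
      simp only [List.nil_append] at hps
      have hch := hps.1
      by_cases hb : ((chosen.length : Int) +
          ((keys.filter (fun k => !(d.getD k []).isEmpty)).length : Int) < num)
      · -- no break: a full row was appended
        obtain ⟨hk1, hk2⟩ := hps.2 hb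
        have hfsub : ∀ k ∈ keys.filter (fun k => !(d.getD k []).isEmpty), k ∈ keys :=
          fun k hk => List.mem_of_mem_filter hk
        have hflen : ((keys.filter (fun k => !(d.getD k []).isEmpty)).map
            (fun k => (d.getD k []).headI)).length
            = (keys.filter (fun k => !(d.getD k []).isEmpty)).length := List.length_map ..
        have htake : ((keys.filter (fun k => !(d.getD k []).isEmpty)).map
              (fun k => (d.getD k []).headI)).take (num.toNat - chosen.length)
            = (keys.filter (fun k => !(d.getD k []).isEmpty)).map
              (fun k => (d.getD k []).headI) := by
          apply List.take_of_length_le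
          rw [hflen]; omega
        rw [htake] at hch
        cases N with
        | zero =>
          have hempty : ∀ k ∈ keys, d.getD k [] = [] := by
            intro k hk
            have := hbound k hk
            exact List.eq_nil_of_length_eq_zero (by omega)
          have hpf : keys.filter (fun k => !(d.getD k []).isEmpty) = [] := by
            rw [List.filter_eq_nil_iff]
            intro k hk; simp [hempty k hk]
          rw [hpf] at hk1 hch
          simp only [List.map_nil, List.append_nil] at hch
          rw [pvWhileA_stop num fuel _ _ _ (by simp [hk1]), hch]
          simp [pvRows]
        | succ M =>
          have hmem : ∀ k ∈ keys.filter (fun k => !(d.getD k []).isEmpty),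
              (pvPassA num keys keys d chosen).2.1.getD k [] = (d.getD k []).tail := by
            intro k hk
            rw [hk2 k, if_pos (hfsub k hk)]
          have hne1 : ∀ k ∈ keys.filter (fun k => !(d.getD k []).isEmpty),
              (d.getD k []) ≠ [] := by
            intro k hk
            have := List.of_mem_filter hk
            simpa using this
          have hsum : pvTL (keys.filter (fun k => !(d.getD k []).isEmpty))
                (pvPassA num keys keys d chosen).2.1
              + (keys.filter (fun k => !(d.getD k []).isEmpty)).length
              = pvTL (keys.filter (fun k => !(d.getD k []).isEmpty)) d := by
            unfold pvTL
            apply pvSumPred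
            intro k hk
            rw [hmem k hk]
            have := hne1 k hk
            have : (d.getD k []).length ≠ 0 := by simpa [List.length_eq_zero_iff] using this
            simp [List.length_tail]
            omega
          have hmono := pvTL_filter_le keys (fun k => !(d.getD k []).isEmpty) d
          have hklen : 1 ≤ keys.length := by
            cases keys with
            | nil => exact absurd rfl hkne
            | cons a l => simp
          have hih := ih (keys.filter (fun k => !(d.getD k []).isEmpty))
            (pvPassA num keys keys d chosen).2.1
            (chosen ++ (keys.filter (fun k => !(d.getD k []).isEmpty)).map
              (fun k => (d.getD k []).headI)) M
            (hndk.filter _)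
            (by
              have h9 : (keys.filter (fun k => !(d.getD k []).isEmpty)).length
                  + pvTL (keys.filter (fun k => !(d.getD k []).isEmpty))
                    (pvPassA num keys keys d chosen).2.1
                  = pvTL (keys.filter (fun k => !(d.getD k []).isEmpty)) d := by
                    rw [← hsum]
                    exact Nat.add_comm _ _
              omega)
            (by
              intro k hk
              rw [hmem k hk]
              have := hbound k (hfsub k hk)
              simp [List.length_tail]
              omega)
          rw [hk1, hch, hih]
          have hrw1 : pvRows M (keys.filter (fun k => !(d.getD k []).isEmpty))
                (fun k => (pvPassA num keys keys d chosen).2.1.getD k [])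
              = pvRows M keys (fun k => (d.getD k []).tail) := by
            rw [pvRows_congr _ _ _ (fun k => (d.getD k []).tail) (fun k hk => hmem k hk)]
            apply pvRows_filter
            intro k _ hpk
            have : (d.getD k []).isEmpty = true := by simpa using hpk
            simp [List.isEmpty_iff.mp this]
          rw [hrw1, pvRows_succ, pvCol_zero, List.take_append, htake, hflen]
          simp only [List.append_assoc, List.length_append, hflen]
          rw [Nat.sub_add_eq]
      · -- break: the row filled chosen up to num
        have ht1 : 1 ≤ num.toNat - chosen.length := by omega
        have ht2 : num.toNat - chosen.length
            ≤ (keys.filter (fun k => !(d.getD k []).isEmpty)).length := by omega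
        have hlen2 : (pvPassA num keys keys d chosen).2.2.length = num.toNat := by
          rw [hch]
          simp
          omega
        rw [pvWhileA_stop num fuel _ _ _ (by
          rw [hlen2]
          intro hcc
          have := hcc.1
          omega)]
        rw [hch]
        cases N with
        | zero =>
          exfalso
          have hempty : ∀ k ∈ keys, d.getD k [] = [] := by
            intro k hk
            have := hbound k hk
            exact List.eq_nil_of_length_eq_zero (by omega)
          have hpf : keys.filter (fun k => !(d.getD k []).isEmpty) = [] := by
            rw [List.filter_eq_nil_iff]
            intro k hk; simp [hempty k hk]
          rw [hpf] at ht2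
          simp at ht2
          omega
        | succ M =>
          rw [pvRows_succ, pvCol_zero, List.take_append]
          have hz : num.toNat - chosen.length
              - ((keys.filter (fun k => !(d.getD k []).isEmpty)).map
                  (fun k => (d.getD k []).headI)).length = 0 := by
            simp
            omega
          rw [hz]
          simp
    · rw [pvWhileA_stop num (fuel + 1) _ _ _ hc]
      rcases not_and_or.mp hc with h1 | h1
      · have : num.toNat - chosen.length = 0 := by
          simp at h1
          omega
        simp [this]
      · have : keys = [] := by simpa using h1
        subst this
        simp [pvRows_nil]

-- B's double loop computes pvRows
lemma pvInnerB (d : PySem.Dict (String × String) (List (List (String × String)))) (j : Nat) :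
    ∀ (keys : List (String × String)) (acc : List (List (String × String))),
    keys.foldl (fun acc k =>
        if (j : Int) < PySem.List.len (d.getD k []) then acc ++ [PySem.List.pyGetD (d.getD k []) (j : Int) []]
        else acc) acc = acc ++ pvCol keys (fun k => d.getD k []) j := by
  intro keys
  induction keys with
  | nil => intro acc; simp [pvCol]
  | cons k ks ih =>
    intro acc
    simp only [List.foldl_cons, pvCol, List.filterMap_cons]
    by_cases hj : (j : Int) < PySem.List.len (d.getD k [])
    · have hjn : j < (d.getD k []).length := by
        simpa [PySem.List.len_eq] using hj
      rw [if_pos hj, ih]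
      have : (d.getD k [])[j]? = some ((d.getD k []).getD j []) := by
        rw [List.getD_eq_getElem?_getD, List.getElem?_eq_getElem hjn]
        simp
      rw [this]
      simp [pvCol, PySem.List.pyGetD_natCast]
    · have hjn : ¬ j < (d.getD k []).length := by
        simpa [PySem.List.len_eq] using hj
      rw [if_neg hj, ih]
      rw [List.getElem?_eq_none_iff.mpr (by omega)]
      simp [pvCol]

lemma pvChosenB (d : PySem.Dict (String × String) (List (List (String × String))))
    (keys : List (String × String)) (longest : Int) :
    (PySem.List.pyRange 0 longest 1).foldl (fun acc i =>
        keys.foldl (fun acc k =>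
          if i < PySem.List.len (d.getD k []) then acc ++ [PySem.List.pyGetD (d.getD k []) i []]
          else acc) acc) [] = pvRows longest.toNat keys (fun k => d.getD k []) := by
  by_cases hpos : 0 < longest
  · rw [PySem.List.pyRange_one]
    have h0 : (longest - 0).toNat = longest.toNat := by omega
    rw [h0]
    unfold pvRows
    generalize longest.toNat = n
    induction n with
    | zero => simp
    | succ m ihm =>
      rw [List.range_succ, List.map_append, List.foldl_append, ihm]
      simp only [List.map_cons, List.map_nil, List.foldl_cons, List.foldl_nil, zero_add]
      rw [pvInnerB]
      simp [List.flatMap_append]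
  · have h1 : longest ≤ 0 := by omega
    rw [PySem.List.pyRange_one_eq_nil (by omega)]
    have h2 : longest.toNat = 0 := by omega
    simp [h2, pvRows]

-- ===== VERDICT (by name: the statement is the Claim_ definition above) =====
theorem select_examples_py_spec : Claim_equal_select_examples_py := by
  intro manifest num phase_balanced _hdom
  unfold Spec_select_examples_py
  cases phase_balanced with
  | false => rfl
  | true =>
    unfold select_examples_py select_examples_py_alt
    simp only [show ((true = false) = False) by simp, if_false]
    set d := manifest.foldl (fun d e => d.modify (pvKeyA e) [] (fun v => v ++ [e])) PySem.Dict.empty with hd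
    set keys := PySem.List.sorted2 d.keys Prod.fst Prod.snd with hkeys
    set longest := PySem.List.maxD (d.values.map (fun g => PySem.List.len g)) (fun x => x) 0 with hlg
    have hnd : d.keys.Nodup := by
      rw [hd]
      exact PySem.Dict.nodup_keys_foldl_modify_key manifest pvKeyA []
        (fun d e => fun v => v ++ [e]) PySem.Dict.empty PySem.Dict.nodup_keys_empty
    have hkeysnd : keys.Nodup :=
      ((PySem.List.sorted2_perm d.keys Prod.fst Prod.snd false).nodup_iff).mpr hnd
    have hbound : ∀ k ∈ keys, (d.getD k []).length ≤ longest.toNat := by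
      intro k hk
      have hkk : k ∈ d.keys :=
        ((PySem.List.sorted2_perm d.keys Prod.fst Prod.snd false).mem_iff).mp hk
      have hv : d.getD k [] ∈ d.values := by
        rw [PySem.Dict.values_eq_map_keys d hnd []]
        exact List.mem_map_of_mem hkk
      have hlm : PySem.List.len (d.getD k []) ∈ d.values.map (fun g => PySem.List.len g) :=
        List.mem_map_of_mem hv
      have hle : PySem.List.len (d.getD k []) ≤ longest := by
        rw [hlg]
        unfold PySem.List.maxD
        cases hmx : PySem.List.max? (d.values.map (fun g => PySem.List.len g)) (fun x => x) with
        | none =>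
          exfalso
          rw [(PySem.List.max?_eq_none_iff _ _).mp hmx] at hlm
          simp at hlm
        | some m =>
          simpa using PySem.List.max?_isMax hmx _ hlm
      rw [PySem.List.len_eq] at hle
      omega
    rw [pvWhileA_spec num (keys.length + pvTL keys d + 1) keys d [] longest.toNat hkeysnd
      (by omega) hbound]
    rw [pvChosenB d keys longest]
    simp only [List.nil_append, List.length_nil, Nat.sub_zero]
    by_cases hn : 0 ≤ num
    · rw [PySem.List.slice_to _ hn, PySem.List.slice_to _ (le_max_right num 0)]
      have hmx : max num 0 = num := max_eq_left hn
      rw [hmx, List.take_take]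
      simp
    · have h0 : num.toNat = 0 := by omega
      have hneg : num = -(((-num).toNat : Nat) : Int) := by omega
      have hmx : max num 0 = 0 := max_eq_right (by omega)
      rw [hmx, PySem.List.slice_to _ (le_refl 0), h0, List.take_zero]
      conv_lhs => rw [hneg]
      rw [PySem.List.slice_to_neg_natCast _ _ (by omega)]
      simp
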